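-- pv_equiv track=rewrite | github.com/ctsit/qipr_approver | qipr_approver/approver/parsers/project_spreadsheet/actions.py | build_field_index_map
-- ===== SOURCE A (Python) =====
-- field_sep = '|'
--
-- def build_field_index_map(acc, header_line):
--     model_mapping = {
--         'project title': 'title',
--         'project description': 'description',
--         'outcome measures': 'measures',
--         'pi email': 'owner',
--         'collaborators': 'collaborator',
--         'collaborator email': 'collaborator_email'
--     }
--     csv_fields = [field.lower() for field in header_line.split(field_sep)]
--     field_index_map = {}
--     for field in csv_fields:
--         if model_mapping.get(field):
--             field_index_map[str(csv_fields.index(field))] = model_mapping.get(field)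
--     return field_index_map
-- ===== SOURCE B (Python) =====
-- field_sep = '|'
--
-- def build_field_index_map(acc, header_line):
--     model_mapping = {
--         'project title': 'title',
--         'project description': 'description',
--         'outcome measures': 'measures',
--         'pi email': 'owner',
--         'collaborators': 'collaborator',
--         'collaborator email': 'collaborator_email'
--     }
--     csv_fields = [field.lower() for field in header_line.split(field_sep)]
--     hits = [(csv_fields.index(csv_name), model_field)
--             for csv_name, model_field in model_mapping.items()
--             if csv_name in csv_fields]
--     hits.sort(key=lambda hit: hit[0])
--     return {str(index): model_field for index, model_field in hits}
-- ===== Notes on version B (the rewrite author's own statement) =====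
-- stated objective: alternative
-- what changed: B inverts the iteration: instead of scanning the CSV fields and re-scanning with list.index per recognized field, it probes each of the six fixed mapping keys against the field list, sorts the (index, model_field) hits by position, and builds the dict from them.
import Mathlib
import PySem

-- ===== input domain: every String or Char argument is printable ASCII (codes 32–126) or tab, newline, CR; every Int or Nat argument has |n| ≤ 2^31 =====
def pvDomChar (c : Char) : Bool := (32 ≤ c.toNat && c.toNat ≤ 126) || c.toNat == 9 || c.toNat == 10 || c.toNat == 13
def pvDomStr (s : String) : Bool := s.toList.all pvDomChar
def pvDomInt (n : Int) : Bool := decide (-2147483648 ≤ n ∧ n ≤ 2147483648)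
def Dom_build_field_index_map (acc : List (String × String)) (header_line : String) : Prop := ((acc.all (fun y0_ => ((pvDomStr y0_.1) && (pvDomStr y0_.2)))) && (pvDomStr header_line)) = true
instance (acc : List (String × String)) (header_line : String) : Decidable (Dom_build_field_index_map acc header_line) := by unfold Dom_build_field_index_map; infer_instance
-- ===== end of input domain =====

-- B inverts the iteration (alternative decomposition): instead of scanning the CSV fields and
-- re-scanning with list.index per recognized field, it probes each of the six fixed mapping keys
-- against the field list once, sorts the (index, model_field) hits by position, and builds the dict.

-- ===== PORT A =====
-- the model_mapping dict literal, identical in both Pythons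
def pvModelMapping : PySem.Dict String String := PySem.Dict.ofList
  [("project title", "title"), ("project description", "description"),
   ("outcome measures", "measures"), ("pi email", "owner"),
   ("collaborators", "collaborator"), ("collaborator email", "collaborator_email")]

def build_field_index_map (acc : List (String × String)) (header_line : String) : List (String × String) :=
  -- csv_fields = [field.lower() for field in header_line.split('|')]   (split? is some: sep ≠ "")
  let csv_fields := ((PySem.Str.split? header_line "|").getD []).map (fun field => PySem.Str.lower field)
  (csv_fields.foldl (fun d field =>
      match PySem.Dict.get? pvModelMapping field with
      | some v =>
          if v ≠ "" then      -- Python truthiness of the looked-up string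
            match PySem.List.index? csv_fields field with
            | some i => PySem.Dict.insert d (PySem.Int.toStr (i : Int)) v
            | none => d       -- unreachable: field ∈ csv_fields
          else d
      | none => d) PySem.Dict.empty).items

-- ===== PORT B =====
def build_field_index_map_alt (acc : List (String × String)) (header_line : String) : List (String × String) :=
  let csv_fields := ((PySem.Str.split? header_line "|").getD []).map (fun field => PySem.Str.lower field)
  -- hits = [(csv_fields.index(name), mf) for name, mf in model_mapping.items() if name in csv_fields]
  let hits := (pvModelMapping.items.filter (fun p => decide (p.1 ∈ csv_fields))).map
      (fun p => ((PySem.List.index? csv_fields p.1).getD 0, p.2))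
  -- hits.sort(key=lambda hit: hit[0])
  let sortedHits := PySem.List.sorted hits (fun hit => hit.1) false
  -- {str(index): mf for index, mf in hits}
  (sortedHits.foldl (fun d hit => PySem.Dict.insert d (PySem.Int.toStr (hit.1 : Int)) hit.2)
      PySem.Dict.empty).items

-- ===== PRECONDITION & SPEC =====
def Spec_build_field_index_map (acc : List (String × String)) (header_line : String) (out : List (String × String)) : Prop := out = build_field_index_map_alt acc header_line
instance (acc : List (String × String)) (header_line : String) (out : List (String × String)) : Decidable (Spec_build_field_index_map acc header_line out) := by unfold Spec_build_field_index_map; infer_instance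

-- ===== CLAIM (what is proved, stated in full; the proofs are below) =====
def Claim_equal_build_field_index_map : Prop := ∀ (acc : List (String × String)) (header_line : String), Dom_build_field_index_map acc header_line → Spec_build_field_index_map acc header_line (build_field_index_map acc header_line)

-- ===== LEMMAS AND PROOFS =====

-- A's loop body over the (fixed) lowered field list L
def pvStepA (L : List String) (d : PySem.Dict String String) (field : String) : PySem.Dict String String :=
  match PySem.Dict.get? pvModelMapping field with
  | some v =>
      if v ≠ "" then
        match PySem.List.index? L field with
        | some i => PySem.Dict.insert d (PySem.Int.toStr (i : Int)) v
        | none => d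
      else d
  | none => d

-- 'model_mapping.get(field)' together with Python truthiness of the looked-up string
def pvRecog (f : String) : Option String :=
  match PySem.Dict.get? pvModelMapping f with
  | some v => if v ≠ "" then some v else none
  | none => none

-- the (first-index, value) pairs A's loop records, in CSV order: counter i, seen set
def pvOcc : List String → PySem.Set String → Nat → List (Nat × String)
  | [], _, _ => []
  | f :: r, seen, i =>
    match pvRecog f with
    | some v => if f ∈ seen then pvOcc r seen (i+1) else (i, v) :: pvOcc r (PySem.Set.add seen f) (i+1)
    | none => pvOcc r seen (i+1)

theorem pvStepA_eq (L : List String) (d : PySem.Dict String String) (f : String) :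
    pvStepA L d f = match pvRecog f with
      | some v =>
          (match PySem.List.index? L f with
           | some i => PySem.Dict.insert d (PySem.Int.toStr (i : Int)) v
           | none => d)
      | none => d := by
  unfold pvStepA pvRecog
  cases hg : PySem.Dict.get? pvModelMapping f with
  | none => rfl
  | some w => by_cases hw : w ≠ "" <;> simp [hw]

-- str(n) is injective on the natural numbers
theorem pvDigitChar_inj : ∀ m n : Fin 10, Nat.digitChar m.val = Nat.digitChar n.val → m = n := by decide

theorem pvToDigits10_inj (m : Nat) : ∀ n : Nat, Nat.toDigits 10 m = Nat.toDigits 10 n → m = n := by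
  induction m using Nat.strong_induction_on with
  | _ m ih =>
    intro n h
    by_cases hm : m < 10
    · by_cases hn : n < 10
      · rw [Nat.toDigits_of_lt_base hm, Nat.toDigits_of_lt_base hn] at h
        have := pvDigitChar_inj ⟨m, hm⟩ ⟨n, hn⟩ (by simpa using h)
        simpa using congrArg Fin.val this
      · exfalso
        rw [Nat.toDigits_of_lt_base hm,
            Nat.toDigits_of_base_le (by norm_num) (le_of_not_gt hn)] at h
        have hl := congrArg List.length h
        have hp := Nat.length_toDigits_pos (b := 10) (n := n / 10)
        simp only [List.length_append, List.length_cons, List.length_nil] at hl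
        omega
    · by_cases hn : n < 10
      · exfalso
        rw [Nat.toDigits_of_lt_base hn,
            Nat.toDigits_of_base_le (by norm_num) (le_of_not_gt hm)] at h
        have hl := congrArg List.length h
        have hp := Nat.length_toDigits_pos (b := 10) (n := m / 10)
        simp only [List.length_append, List.length_cons, List.length_nil] at hl
        omega
      · rw [Nat.toDigits_of_base_le (by norm_num) (le_of_not_gt hm),
            Nat.toDigits_of_base_le (by norm_num) (le_of_not_gt hn)] at h
        obtain ⟨h1, h2⟩ := List.append_inj' h (by simp)
        have hdiv : m / 10 = n / 10 := ih (m / 10) (Nat.div_lt_self (by omega) (by norm_num)) _ h1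
        have hmod : m % 10 = n % 10 := by
          have := pvDigitChar_inj ⟨m % 10, Nat.mod_lt _ (by norm_num)⟩
            ⟨n % 10, Nat.mod_lt _ (by norm_num)⟩ (by simpa using h2)
          simpa using congrArg Fin.val this
        omega

theorem pvToStr_natCast_inj {j k : Nat}
    (h : PySem.Int.toStr (j : Int) = PySem.Int.toStr (k : Int)) : j = k := by
  have h2 := congrArg String.toList h
  rw [PySem.Int.toList_toStr, PySem.Int.toList_toStr] at h2
  simp only [PySem.Int.toChars] at h2
  have hj : ¬ ((j : Int) < 0) := by omega
  have hk : ¬ ((k : Int) < 0) := by omega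
  rw [if_neg hj, if_neg hk] at h2
  simpa using pvToDigits10_inj _ _ (by simpa using h2)

-- overwriting an existing key with its own value leaves the dict unchanged
theorem pvInsert_noop (d : PySem.Dict String String) (k v : String)
    (hget : PySem.Dict.get? d k = some v) (hnd : d.keys.Nodup) :
    PySem.Dict.insert d k v = d := by
  have hc : PySem.Dict.contains d k = true := by
    rw [PySem.Dict.contains_eq_isSome_get?, hget]; rfl
  have hpt : ∀ p ∈ d.items, (if p.1 == k then (k, v) else p) = p := by
    intro p hp
    by_cases hk : p.1 = k
    · have hmem : (k, p.2) ∈ d.items := by rw [← hk]; exact hp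
      have := PySem.Dict.get?_of_mem_items d hmem hnd
      rw [hget] at this
      have hv : p.2 = v := by injection this with h'; exact h'.symm
      rw [if_pos (by simp [hk])]
      exact Prod.ext_iff.mpr ⟨hk.symm, hv.symm⟩
    · simp [hk]
  cases d with
  | mk items =>
      simp only [PySem.Dict.insert, hc, if_pos]
      congr 1
      calc List.map (fun p => if p.1 == k then (k, v) else p) items
          = List.map id items := List.map_congr_left (by simpa using hpt)
        _ = items := List.map_id items

-- A-side invariant: the fold's items extend d.items by the pvOcc pairs of the suffix
theorem pvMainA (suf : List String) : ∀ (pre : List String) (d : PySem.Dict String String)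
    (seen : PySem.Set String),
    (∀ g, g ∈ seen ↔ ((pvRecog g).isSome ∧ g ∈ pre)) →
    d.keys.Nodup →
    (∀ g, g ∈ seen → ∃ (j : Nat) (v : String), j < pre.length ∧
        PySem.List.index? (pre ++ suf) g = some j ∧ pvRecog g = some v ∧
        PySem.Dict.get? d (PySem.Int.toStr (j : Int)) = some v) →
    (∀ s, s ∈ d.keys → ∃ j : Nat, j < pre.length ∧ s = PySem.Int.toStr (j : Int)) →
    (suf.foldl (pvStepA (pre ++ suf)) d).items
      = d.items ++ (pvOcc suf seen pre.length).map (fun p => (PySem.Int.toStr (p.1 : Int), p.2)) := by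
  induction suf with
  | nil => intro pre d seen _ _ _ _; simp [pvOcc]
  | cons f rest ih =>
    intro pre d seen h1 hnd h2 h3
    rw [List.foldl_cons]
    have hL : pre ++ f :: rest = (pre ++ [f]) ++ rest := List.append_cons pre f rest
    have hlen : (pre ++ [f]).length = pre.length + 1 := by simp
    cases hr : pvRecog f with
    | none =>
        have hA : pvStepA (pre ++ f :: rest) d f = d := by rw [pvStepA_eq, hr]
        rw [hA, hL, ih (pre ++ [f]) d seen ?_ hnd ?_ ?_]
        · simp [pvOcc, hr, hlen]
        · intro g
          rw [h1 g]
          constructor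
          · rintro ⟨hs, hm⟩; exact ⟨hs, by simp [hm]⟩
          · rintro ⟨hs, hm⟩
            refine ⟨hs, ?_⟩
            rcases (List.mem_append.mp hm) with h' | h'
            · exact h'
            · exfalso; simp at h'; subst h'; rw [hr] at hs; simp at hs
        · intro g hg
          obtain ⟨j, v, hj, hidx, hrec, hget⟩ := h2 g hg
          exact ⟨j, v, by simp; omega, by rw [← hL]; exact hidx, hrec, hget⟩
        · intro s hs
          obtain ⟨j, hj, hjs⟩ := h3 s hs
          exact ⟨j, by omega, hjs⟩
    | some v =>
        by_cases hf : f ∈ seen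
        · obtain ⟨j, v', hj, hidx, hrec, hget⟩ := h2 f hf
          rw [hr] at hrec
          have hv : v' = v := by injection hrec with h'; exact h'.symm
          rw [hv] at hget
          have hA : pvStepA (pre ++ f :: rest) d f = d := by
            rw [pvStepA_eq, hr, hidx]
            exact pvInsert_noop d _ v hget hnd
          rw [hA, hL, ih (pre ++ [f]) d seen ?_ hnd ?_ ?_]
          · simp [pvOcc, hr, hf, hlen]
          · intro g
            rw [h1 g]
            constructor
            · rintro ⟨hs, hm⟩; exact ⟨hs, by simp [hm]⟩
            · rintro ⟨hs, hm⟩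
              refine ⟨hs, ?_⟩
              rcases (List.mem_append.mp hm) with h' | h'
              · exact h'
              · simp at h'; subst h'; exact ((h1 _).mp hf).2
          · intro g hg
            obtain ⟨j', v', hj', hidx', hrec', hget'⟩ := h2 g hg
            exact ⟨j', v', by simp; omega, by rw [← hL]; exact hidx', hrec', hget'⟩
          · intro s hs
            obtain ⟨j', hj', hjs⟩ := h3 s hs
            exact ⟨j', by omega, hjs⟩
        · have hfpre : f ∉ pre := fun hm => hf ((h1 f).mpr ⟨by rw [hr]; rfl, hm⟩)
          have hidxf : PySem.List.index? (pre ++ f :: rest) f = some pre.length :=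
            (PySem.List.index?_eq_some_iff _ _ _).mpr ⟨pre, rest, rfl, rfl, hfpre⟩
          have hA : pvStepA (pre ++ f :: rest) d f
              = PySem.Dict.insert d (PySem.Int.toStr (pre.length : Int)) v := by
            rw [pvStepA_eq, hr, hidxf]
          have hfresh : PySem.Dict.contains d (PySem.Int.toStr (pre.length : Int)) = false := by
            by_contra hc
            have hmem : PySem.Int.toStr (pre.length : Int) ∈ d.keys :=
              (PySem.Dict.contains_iff_mem_keys d _).mp (by
                cases h' : PySem.Dict.contains d (PySem.Int.toStr (pre.length : Int))
                · exact absurd h' hc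
                · rfl)
            obtain ⟨j, hj, hjs⟩ := h3 _ hmem
            have := pvToStr_natCast_inj hjs.symm
            omega
          have hitems := PySem.Dict.items_insert_of_not_contains
            (d := d) (v := v) hfresh
          rw [hA, hL, ih (pre ++ [f]) _ (PySem.Set.add seen f) ?_
                (PySem.Dict.nodup_keys_insert d _ v hnd) ?_ ?_]
          · rw [hitems]
            simp only [pvOcc, hr, hf, hlen]
            simp
          · intro g
            rw [PySem.Set.mem_add, h1 g]
            constructor
            · rintro (⟨hs, hm⟩ | hgf)
              · exact ⟨hs, by simp [hm]⟩
              · subst hgf; exact ⟨by rw [hr]; rfl, by simp⟩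
            · rintro ⟨hs, hm⟩
              rcases (List.mem_append.mp hm) with h' | h'
              · exact Or.inl ⟨hs, h'⟩
              · simp at h'; subst h'; exact Or.inr rfl
          · intro g hg
            rcases (PySem.Set.mem_add seen f g).mp hg with hg' | hgf
            · obtain ⟨j', v', hj', hidx', hrec', hget'⟩ := h2 g hg'
              refine ⟨j', v', by simp; omega, by rw [← hL]; exact hidx', hrec', ?_⟩
              rw [PySem.Dict.get?_insert]
              rw [if_neg ?_]
              · exact hget'
              · intro heq
                have := pvToStr_natCast_inj heq
                omega
            · subst hgf
              refine ⟨pre.length, v, by simp, by rw [← hL]; exact hidxf, hr, ?_⟩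
              exact PySem.Dict.get?_insert_self d _ v
          · intro s hs
            rw [PySem.Dict.keys_insert_of_not_contains d v hfresh] at hs
            rcases List.mem_append.mp hs with h' | h'
            · obtain ⟨j', hj', hjs⟩ := h3 s h'
              exact ⟨j', by omega, hjs⟩
            · simp at h'; exact ⟨pre.length, by omega, h'⟩

-- pvRecog answers exactly the mapping's pairs (all six values are nonempty)
theorem pvRecog_iff (k v : String) :
    pvRecog k = some v ↔ (k, v) ∈ pvModelMapping.items := by
  constructor
  · intro h
    unfold pvRecog at h
    cases hg : PySem.Dict.get? pvModelMapping k with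
    | none => rw [hg] at h; exact absurd h (by simp)
    | some w =>
        rw [hg] at h
        change (if w ≠ "" then some w else none) = some v at h
        by_cases hw : w ≠ ""
        · rw [if_pos hw] at h
          injection h with h'; subst h'
          exact PySem.Dict.mem_items_of_get?_eq_some pvModelMapping hg
        · rw [if_neg hw] at h; exact absurd h (by simp)
  · intro h
    have hnd : pvModelMapping.keys.Nodup := by decide
    have hg : PySem.Dict.get? pvModelMapping k = some v :=
      (PySem.Dict.get?_eq_some_iff_mem_items pvModelMapping k v hnd).mpr h
    have hne : v ≠ "" := by
      have hall : ∀ p ∈ pvModelMapping.items, p.2 ≠ "" := by decide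
      exact hall (k, v) h
    unfold pvRecog
    rw [hg]
    change (if v ≠ "" then some v else none) = some v
    rw [if_pos hne]

-- pvOcc membership: exactly the first occurrences of recognized, unseen fields
theorem pvOcc_mem (xs : List String) : ∀ (seen : PySem.Set String) (i0 i : Nat) (v : String),
    ((i, v) ∈ pvOcc xs seen i0 ↔
      ∃ k j, k ∉ seen ∧ pvRecog k = some v ∧ PySem.List.index? xs k = some j ∧ i = i0 + j) := by
  induction xs with
  | nil =>
      intro seen i0 i v
      simp only [pvOcc, List.not_mem_nil, false_iff]
      rintro ⟨k, j, _, _, hkj, _⟩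
      rw [PySem.List.index?_eq_idxOf?] at hkj
      simp at hkj
  | cons f r ih =>
      intro seen i0 i v
      have hidx_ne : ∀ k, k ≠ f →
          PySem.List.index? (f :: r) k = (PySem.List.index? r k).map (· + 1) := by
        intro k hk
        exact PySem.List.index?_cons_of_ne r (Ne.symm hk)
      cases hr : pvRecog f with
      | none =>
          simp only [pvOcc, hr]
          rw [ih]
          constructor
          · rintro ⟨k, j, hks, hkr, hkj, hi⟩
            have hkf : k ≠ f := fun h => by subst h; rw [hr] at hkr; exact absurd hkr (by simp)
            exact ⟨k, j + 1, hks, hkr, by rw [hidx_ne k hkf, hkj]; rfl, by omega⟩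
          · rintro ⟨k, j, hks, hkr, hkj, hi⟩
            have hkf : k ≠ f := fun h => by subst h; rw [hr] at hkr; exact absurd hkr (by simp)
            rw [hidx_ne k hkf] at hkj
            cases hj' : PySem.List.index? r k with
            | none => rw [hj'] at hkj; exact absurd hkj (by simp)
            | some j' =>
                rw [hj'] at hkj
                have : j = j' + 1 := by simp only [Option.map_some, Option.some.injEq] at hkj; omega
                exact ⟨k, j', hks, hkr, hj', by omega⟩
      | some w =>
          by_cases hf : f ∈ seen
          · simp only [pvOcc, hr, if_pos hf]
            rw [ih]
            constructor
            · rintro ⟨k, j, hks, hkr, hkj, hi⟩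
              have hkf : k ≠ f := fun h => by subst h; exact hks hf
              exact ⟨k, j + 1, hks, hkr, by rw [hidx_ne k hkf, hkj]; rfl, by omega⟩
            · rintro ⟨k, j, hks, hkr, hkj, hi⟩
              have hkf : k ≠ f := fun h => by subst h; exact hks hf
              rw [hidx_ne k hkf] at hkj
              cases hj' : PySem.List.index? r k with
              | none => rw [hj'] at hkj; exact absurd hkj (by simp)
              | some j' =>
                  rw [hj'] at hkj
                  have : j = j' + 1 := by simp only [Option.map_some, Option.some.injEq] at hkj; omega
                  exact ⟨k, j', hks, hkr, hj', by omega⟩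
          · simp only [pvOcc, hr, if_neg hf, List.mem_cons]
            rw [ih]
            constructor
            · rintro (heq | ⟨k, j, hks, hkr, hkj, hi⟩)
              · have hi : i = i0 := congrArg Prod.fst heq
                have hv : v = w := congrArg Prod.snd heq
                subst hv
                exact ⟨f, 0, hf, hr, PySem.List.index?_cons_self f r, by omega⟩
              · have hkf : k ≠ f := fun h => by
                  subst h; exact hks ((PySem.Set.mem_add seen k k).mpr (Or.inr rfl))
                have hks' : k ∉ seen := fun h =>
                  hks ((PySem.Set.mem_add seen f k).mpr (Or.inl h))
                exact ⟨k, j + 1, hks', hkr, by rw [hidx_ne k hkf, hkj]; rfl, by omega⟩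
            · rintro ⟨k, j, hks, hkr, hkj, hi⟩
              by_cases hkf : k = f
              · subst hkf
                rw [PySem.List.index?_cons_self] at hkj
                have hj0 : j = 0 := by injection hkj with h'; omega
                rw [hr] at hkr
                have hv : v = w := by injection hkr with h'; exact h'.symm
                subst hv
                exact Or.inl (by simp [hi, hj0])
              · rw [hidx_ne k hkf] at hkj
                cases hj' : PySem.List.index? r k with
                | none => rw [hj'] at hkj; exact absurd hkj (by simp)
                | some j' =>
                    rw [hj'] at hkj
                    have : j = j' + 1 := by simp only [Option.map_some, Option.some.injEq] at hkj; omega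
                    have hks' : k ∉ PySem.Set.add seen f := fun h => by
                      rcases (PySem.Set.mem_add seen f k).mp h with h' | h'
                      · exact hks h'
                      · exact hkf h'
                    exact Or.inr ⟨k, j', hks', hkr, hj', by omega⟩

-- pvOcc indices are ≥ the counter and strictly increasing
theorem pvOcc_ge (xs : List String) : ∀ (seen : PySem.Set String) (i0 : Nat),
    ∀ p ∈ pvOcc xs seen i0, i0 ≤ p.1 := by
  induction xs with
  | nil => intro seen i0 p hp; simp [pvOcc] at hp
  | cons f r ih =>
      intro seen i0 p hp
      cases hr : pvRecog f with
      | none =>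
          simp only [pvOcc, hr] at hp
          have := ih seen (i0 + 1) p hp; omega
      | some w =>
          by_cases hf : f ∈ seen
          · simp only [pvOcc, hr, if_pos hf] at hp
            have := ih seen (i0 + 1) p hp; omega
          · simp only [pvOcc, hr, if_neg hf] at hp
            rcases List.mem_cons.mp hp with h' | h'
            · subst h'; simp
            · have := ih (PySem.Set.add seen f) (i0 + 1) p h'; omega

theorem pvOcc_pairwise (xs : List String) : ∀ (seen : PySem.Set String) (i0 : Nat),
    (pvOcc xs seen i0).Pairwise (fun a b => a.1 < b.1) := by
  induction xs with
  | nil => intro seen i0; simp [pvOcc]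
  | cons f r ih =>
      intro seen i0
      cases hr : pvRecog f with
      | none => simp only [pvOcc, hr]; exact ih seen (i0 + 1)
      | some w =>
          by_cases hf : f ∈ seen
          · simp only [pvOcc, hr, if_pos hf]; exact ih seen (i0 + 1)
          · simp only [pvOcc, hr, if_neg hf]
            refine List.Pairwise.cons ?_ (ih (PySem.Set.add seen f) (i0 + 1))
            intro p hp
            have := pvOcc_ge r (PySem.Set.add seen f) (i0 + 1) p hp
            simp; omega

theorem pvKey (L : List String) :
    (L.foldl (pvStepA L) PySem.Dict.empty).items
      = ((PySem.List.sorted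
            ((pvModelMapping.items.filter (fun p => decide (p.1 ∈ L))).map
              (fun p => ((PySem.List.index? L p.1).getD 0, p.2)))
            (fun hit => hit.1) false).foldl
          (fun d hit => PySem.Dict.insert d (PySem.Int.toStr (hit.1 : Int)) hit.2)
          PySem.Dict.empty).items := by
  -- A side: items = map emb (pvOcc L ∅ 0)
  have hA : (L.foldl (pvStepA L) PySem.Dict.empty).items
      = (pvOcc L PySem.Set.empty 0).map (fun p => (PySem.Int.toStr (p.1 : Int), p.2)) := by
    have := pvMainA L [] PySem.Dict.empty PySem.Set.empty
      (by intro g; simp [PySem.Set.empty])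
      PySem.Dict.nodup_keys_empty
      (by intro g hg; simp [PySem.Set.empty] at hg)
      (by intro s hs; simp [PySem.Dict.keys_empty] at hs)
    simpa using this
  rw [hA]
  -- B side
  set hits := (pvModelMapping.items.filter (fun p => decide (p.1 ∈ L))).map
      (fun p => ((PySem.List.index? L p.1).getD 0, p.2)) with hhits
  -- membership in hits
  have hmem_hits : ∀ (i : Nat) (v : String), (i, v) ∈ hits ↔
      ∃ k, (k, v) ∈ pvModelMapping.items ∧ PySem.List.index? L k = some i := by
    intro i v
    rw [hhits]
    simp only [List.mem_map, List.mem_filter]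
    constructor
    · rintro ⟨p, ⟨hpm, hpl⟩, hpe⟩
      have hpl' : p.1 ∈ L := of_decide_eq_true hpl
      obtain ⟨j, hj⟩ := Option.isSome_iff_exists.mp
        ((PySem.List.index?_isSome_iff L p.1).mpr hpl')
      have hi : i = j := by
        have := congrArg Prod.fst hpe; simp only [hj, Option.getD_some] at this; omega
      have hv : v = p.2 := (congrArg Prod.snd hpe).symm
      subst hi; subst hv
      exact ⟨p.1, by rw [show (p.1, p.2) = p from rfl]; exact hpm, hj⟩
    · rintro ⟨k, hkm, hki⟩
      have hkl : k ∈ L := (PySem.List.index?_isSome_iff L k).mp (by rw [hki]; rfl)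
      exact ⟨(k, v), ⟨hkm, decide_eq_true hkl⟩, by rw [hki]; rfl⟩
  -- hits is Nodup (distinct mapping keys hit distinct first indices)
  have hnd_hits : hits.Nodup := by
    rw [hhits]
    have hsub : (pvModelMapping.items.filter (fun p => decide (p.1 ∈ L))).Nodup :=
      List.Sublist.nodup List.filter_sublist (by decide)
    refine List.Nodup.map_on ?_ hsub
    intro p hp q hq heq
    have hpl : p.1 ∈ L := of_decide_eq_true (List.mem_filter.mp hp).2
    have hql : q.1 ∈ L := of_decide_eq_true (List.mem_filter.mp hq).2
    obtain ⟨jp, hjp⟩ := Option.isSome_iff_exists.mp ((PySem.List.index?_isSome_iff L p.1).mpr hpl)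
    obtain ⟨jq, hjq⟩ := Option.isSome_iff_exists.mp ((PySem.List.index?_isSome_iff L q.1).mpr hql)
    have hj : jp = jq := by
      have := congrArg Prod.fst heq; simp only [hjp, hjq, Option.getD_some] at this; omega
    obtain ⟨hkp, hgp, _⟩ := PySem.List.getElem_of_index?_eq_some hjp
    obtain ⟨hkq, hgq, _⟩ := PySem.List.getElem_of_index?_eq_some hjq
    have hk : p.1 = q.1 := by rw [← hgp, ← hgq]; subst hj; rfl
    have hv : p.2 = q.2 := by
      have := congrArg Prod.snd heq; simpa using this
    exact Prod.ext hk hv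
  -- sorted hits = pvOcc L ∅ 0
  have hsorted : PySem.List.sorted hits (fun hit => hit.1) false = pvOcc L PySem.Set.empty 0 := by
    apply PySem.List.sorted_eq_of_perm_of_pairwise_lt
    · -- permutation: same members, both Nodup
      have hnd_occ : (pvOcc L PySem.Set.empty 0).Nodup :=
        List.Pairwise.imp (fun h => by
          intro he; subst he; omega) (pvOcc_pairwise L PySem.Set.empty 0)
      rw [List.perm_ext_iff_of_nodup hnd_occ hnd_hits]
      rintro ⟨i, v⟩
      rw [hmem_hits i v, pvOcc_mem L PySem.Set.empty 0 i v]
      constructor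
      · rintro ⟨k, j, _, hkr, hkj, hi⟩
        exact ⟨k, (pvRecog_iff k v).mp hkr, by rw [hkj]; congr 1; omega⟩
      · rintro ⟨k, hkm, hki⟩
        exact ⟨k, i, by simp [PySem.Set.empty], (pvRecog_iff k v).mpr hkm, hki, by omega⟩
    · exact pvOcc_pairwise L PySem.Set.empty 0
  rw [hsorted]
  -- the final dict comprehension over distinct fresh keys appends its pairs
  have hfstnd : ((pvOcc L PySem.Set.empty 0).map
      (fun hit => PySem.Int.toStr (hit.1 : Int))).Nodup := by
    have hp : ((pvOcc L PySem.Set.empty 0).map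
        (fun hit => PySem.Int.toStr (hit.1 : Int))).Pairwise (· ≠ ·) := by
      refine List.Pairwise.map _ ?_ (pvOcc_pairwise L PySem.Set.empty 0)
      intro a b hab heq
      have := pvToStr_natCast_inj heq
      omega
    exact hp
  symm
  simpa using PySem.Dict.items_foldl_insert_fresh (pvOcc L PySem.Set.empty 0)
    (fun hit => PySem.Int.toStr (hit.1 : Int)) (fun hit => hit.2) PySem.Dict.empty
    (fun a _ => PySem.Dict.contains_empty _) hfstnd


theorem build_field_index_map_spec : Claim_equal_build_field_index_map := by
  intro acc header_line _
  unfold Spec_build_field_index_map build_field_index_map build_field_index_map_alt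
  generalize ((PySem.Str.split? header_line "|").getD []).map (fun field => PySem.Str.lower field) = L
  exact pvKey L
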